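-- pv_equiv track=rewrite | github.com/Scriptim/AdventOfCode2023 | 14_parabolic_reflector_dish/parabolic_reflector_dish.py | tilt_north
-- ===== SOURCE A (Python) =====
-- def tilt_north(platform: list[list[str]]) -> list[list[str]]:
--     stable = True
--     for row in range(len(platform)):
--         for col in range(len(platform[row])):
--             if platform[row][col] == 'O':
--                 new_row = row
--                 while new_row > 0 and platform[new_row - 1][col] == '.':
--                     new_row -= 1
--                 if new_row != row:
--                     platform[row][col], platform[new_row][col] = '.', 'O'
--                     stable = False
--     return platform if stable else tilt_north(platform)
-- ===== SOURCE B (Python) =====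
-- def tilt_north(platform: list[list[str]]) -> list[list[str]]:
--     # Single top-to-bottom sweep: per column, track the next free slot (row
--     # below the last blocker / last stacked rock); each 'O' drops into it.
--     # Mutates platform in place like the original.
--     free = {}
--     for r, row in enumerate(platform):
--         for c in range(len(row)):
--             cell = row[c]
--             if cell == 'O':
--                 f = free.get(c, 0)
--                 if f != r:
--                     row[c] = '.'
--                     platform[f][c] = 'O'
--                 free[c] = f + 1
--             elif cell != '.':
--                 free[c] = r + 1
--     return platform
-- ===== Notes on version B (the rewrite author's own statement) =====
-- stated objective: alternative
-- what changed: Replaced the per-rock upward while-scan plus recursion-until-stable with a single top-to-bottom sweep that keeps, per column, the next free slot in a dict (reset below each blocker), placing every rock in O(1) with no second pass.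
import Mathlib
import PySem

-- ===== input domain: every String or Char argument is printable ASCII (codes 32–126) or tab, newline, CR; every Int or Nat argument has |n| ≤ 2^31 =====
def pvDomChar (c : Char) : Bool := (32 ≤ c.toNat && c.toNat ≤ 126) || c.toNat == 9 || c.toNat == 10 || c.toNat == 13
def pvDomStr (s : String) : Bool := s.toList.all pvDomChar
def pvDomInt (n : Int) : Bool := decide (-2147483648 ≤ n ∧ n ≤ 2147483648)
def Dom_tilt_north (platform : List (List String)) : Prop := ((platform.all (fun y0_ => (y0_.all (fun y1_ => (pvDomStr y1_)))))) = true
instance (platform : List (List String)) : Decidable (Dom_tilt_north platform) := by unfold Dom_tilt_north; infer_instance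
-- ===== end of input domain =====

-- B replaces A's per-rock upward while-scan plus recursion-until-stable by a single
-- top-to-bottom sweep keeping, per column, the next free slot in a dict (alternative
-- algorithm; no rescanning and no second pass).
-- Both Pythons mutate `platform` in place and return it; A's final state equals its
-- return value, and B performs the same mutation, so the equivalence is about that value.

-- ===== PORT A =====
-- Shared 2D accessors. All indices come from range(len(..)) (non-negative), so plain
-- getElem?/List.set are exact for Python's platform[r][c] reads and writes
-- (PySem.List.pyGet?_natCast / pySetD_natCast); out-of-range reads are `none` = IndexError.
def cell2 (g : List (List String)) (r c : Nat) : Option String :=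
  (g[r]?).bind (fun row => row[c]?)

def setCell (g : List (List String)) (r c : Nat) (v : String) : List (List String) :=
  g.set r ((g.getD r []).set c v)

-- the while-loop: new_row starts at `row`; while new_row > 0 and platform[new_row-1][col] == '.': new_row -= 1
def scanA (g : List (List String)) (c : Nat) : Nat → Nat
  | 0 => 0
  | n+1 => if cell2 g n c = some "." then scanA g c n else n+1

def stepA (r : Nat) (gs : List (List String) × Bool) (c : Nat) : List (List String) × Bool :=
  if cell2 gs.1 r c = some "O" then
    let f := scanA gs.1 c r
    if f ≠ r then (setCell (setCell gs.1 r c ".") f c "O", false) else gs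
  else gs

def rowA (gs : List (List String) × Bool) (r : Nat) : List (List String) × Bool :=
  List.foldl (stepA r) gs (List.range ((gs.1.getD r []).length))

def passA (g : List (List String)) : List (List String) × Bool :=
  List.foldl rowA (g, true) (List.range g.length)

-- measure for A's recursion-until-stable: weighted count of 'O' cells (rocks only move up)
def countO (row : List String) : Nat := row.count "O"

def OmeasAux : Nat → List (List String) → Nat
  | _, [] => 0
  | i, row :: t => i * countO row + OmeasAux (i+1) t

def Omeas (g : List (List String)) : Nat := OmeasAux 0 g

-- termination lemma cited by tilt_north's decreasing_by (proof below the claim block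
-- is impossible for it: the definition needs it, so it stays here)
theorem scanA_le (g : List (List String)) (c : Nat) : ∀ r, scanA g c r ≤ r := by
  intro r
  induction r with
  | zero => simp [scanA]
  | succ n ih =>
    simp only [scanA]
    split
    · omega
    · omega

theorem scanA_dots (g : List (List String)) (c : Nat) :
    ∀ r t, scanA g c r ≤ t → t < r → cell2 g t c = some "." := by
  intro r
  induction r with
  | zero => omega
  | succ n ih =>
    intro t h1 h2
    by_cases hdot : cell2 g n c = some "."
    · simp only [scanA, if_pos hdot] at h1
      rcases Nat.lt_or_ge t n with h | h
      · exact ih t h1 h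
      · have : t = n := by omega
        subst this; exact hdot
    · simp only [scanA, if_neg hdot] at h1
      omega

theorem countO_set_dot (row : List String) (c : Nat) (h : row[c]? = some "O") :
    countO (row.set c ".") + 1 = countO row := by
  induction row generalizing c with
  | nil => simp at h
  | cons x xs ih =>
    cases c with
    | zero =>
      simp at h
      simp [countO, h]
    | succ m =>
      simp at h
      have := ih m h
      simp only [List.set, countO, List.count_cons] at *
      omega

theorem countO_set_O (row : List String) (c : Nat) (h : row[c]? = some ".") :
    countO (row.set c "O") = countO row + 1 := by
  induction row generalizing c with
  | nil => simp at h
  | cons x xs ih =>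
    cases c with
    | zero =>
      simp at h
      simp [countO, h]
    | succ m =>
      simp at h
      have := ih m h
      simp only [List.set, countO, List.count_cons] at *
      omega

theorem OmeasAux_set (g : List (List String)) :
    ∀ (i r : Nat) (row w : List String), g[r]? = some row →
    OmeasAux i (g.set r w) + (i + r) * countO row = OmeasAux i g + (i + r) * countO w := by
  induction g with
  | nil => intro i r row w h; simp at h
  | cons x xs ih =>
    intro i r row w h
    cases r with
    | zero =>
      simp at h; subst h
      simp [OmeasAux]
      ring
    | succ m =>
      simp at h
      have := ih (i+1) m row w h
      simp only [List.set, OmeasAux]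
      rw [show i + (m + 1) = (i + 1) + m by omega]
      omega

theorem cell2_some (g : List (List String)) (r c : Nat) (v : String)
    (h : cell2 g r c = some v) : ∃ row, g[r]? = some row ∧ row[c]? = some v := by
  unfold cell2 at h
  cases hrow : g[r]? with
  | none => rw [hrow] at h; simp at h
  | some row => rw [hrow] at h; exact ⟨row, rfl, h⟩

theorem Omeas_swap (g : List (List String)) (r f c : Nat) (hfr : f < r)
    (hO : cell2 g r c = some "O") (hdot : cell2 g f c = some ".") :
    Omeas (setCell (setCell g r c ".") f c "O") < Omeas g := by
  obtain ⟨rowr, hgr, hrc⟩ := cell2_some g r c "O" hO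
  obtain ⟨rowf, hgf, hfc⟩ := cell2_some g f c "." hdot
  have hne : f ≠ r := Nat.ne_of_lt hfr
  have hgetD : g.getD r [] = rowr := by
    rw [List.getD_eq_getElem?_getD, hgr]; rfl
  have hg1 : setCell g r c "." = g.set r (rowr.set c ".") := by
    unfold setCell; rw [hgetD]
  set g1 := g.set r (rowr.set c ".") with hg1def
  have hg1f : g1[f]? = some rowf := by
    rw [hg1def, List.getElem?_set_ne (Ne.symm hne)]; exact hgf
  have hg2 : setCell g1 f c "O" = g1.set f (rowf.set c "O") := by
    unfold setCell
    rw [show g1.getD f [] = rowf from by rw [List.getD_eq_getElem?_getD, hg1f]; rfl]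
  have e1 := OmeasAux_set g 0 r rowr (rowr.set c ".") hgr
  have e2 := OmeasAux_set g1 0 f rowf (rowf.set c "O") hg1f
  have c1 := countO_set_dot rowr c hrc
  have c2 := countO_set_O rowf c hfc
  rw [hg1, hg2]
  show Omeas (g1.set f (rowf.set c "O")) < Omeas g
  unfold Omeas at *
  simp only [Nat.zero_add] at e1 e2
  have m1 : r * countO rowr = r * countO (rowr.set c ".") + r := by
    rw [← c1]; ring
  have m2 : f * countO (rowf.set c "O") = f * countO rowf + f := by
    rw [c2]; ring
  rw [m1] at e1
  rw [m2] at e2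
  rw [← hg1def] at e1
  omega

theorem foldl_dec {α : Type} (F : List (List String) × Bool → α → List (List String) × Bool)
    (hF : ∀ s a, F s a = s ∨ ((F s a).2 = false ∧ Omeas (F s a).1 < Omeas s.1)) :
    ∀ (l : List α) (s : List (List String) × Bool),
      List.foldl F s l = s ∨ ((List.foldl F s l).2 = false ∧ Omeas (List.foldl F s l).1 < Omeas s.1) := by
  intro l
  induction l with
  | nil => intro s; left; rfl
  | cons a t ih =>
    intro s
    simp only [List.foldl]
    rcases hF s a with h | ⟨h1, h2⟩
    · rw [h]; exact ih s
    · rcases ih (F s a) with h' | ⟨h1', h2'⟩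
      · rw [h']; right; exact ⟨h1, h2⟩
      · right; exact ⟨h1', by omega⟩

theorem stepA_dec (r : Nat) : ∀ s c, stepA r s c = s ∨ ((stepA r s c).2 = false ∧ Omeas (stepA r s c).1 < Omeas s.1) := by
  intro s c
  unfold stepA
  by_cases hO : cell2 s.1 r c = some "O"
  · rw [if_pos hO]
    by_cases hfr : scanA s.1 c r ≠ r
    · rw [if_pos hfr]
      right
      refine ⟨rfl, ?_⟩
      have hlt : scanA s.1 c r < r := lt_of_le_of_ne (scanA_le s.1 c r) hfr
      exact Omeas_swap s.1 r (scanA s.1 c r) c hlt hO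
        (scanA_dots s.1 c r (scanA s.1 c r) le_rfl hlt)
    · rw [if_neg hfr]; left; rfl
  · rw [if_neg hO]; left; rfl

theorem rowA_dec : ∀ s r, rowA s r = s ∨ ((rowA s r).2 = false ∧ Omeas (rowA s r).1 < Omeas s.1) := by
  intro s r
  exact foldl_dec (stepA r) (stepA_dec r) _ s

theorem passA_measure (g : List (List String)) (h : (passA g).2 = false) :
    Omeas (passA g).1 < Omeas g := by
  rcases foldl_dec rowA rowA_dec (List.range g.length) (g, true) with h' | ⟨_, h2⟩
  · rw [passA] at h; rw [h'] at h; simp at h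
  · exact h2

def tilt_north (platform : List (List String)) : List (List String) :=
  let p := passA platform
  if p.2 then p.1 else tilt_north p.1
termination_by Omeas platform
decreasing_by
  rename_i h
  exact passA_measure platform (by revert h; cases (passA platform).2 <;> simp)

-- ===== PORT B =====
-- single sweep; free : dict column ↦ next free row index
def stepB (r : Nat) (gf : List (List String) × PySem.Dict Nat Nat) (c : Nat) :
    List (List String) × PySem.Dict Nat Nat :=
  let cell := cell2 gf.1 r c
  if cell = some "O" then
    let f := gf.2.getD c 0
    (if f ≠ r then setCell (setCell gf.1 r c ".") f c "O" else gf.1, gf.2.insert c (f+1))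
  else if cell = some "." then gf
  else (gf.1, gf.2.insert c (r+1))

def rowB (gf : List (List String) × PySem.Dict Nat Nat) (r : Nat) :
    List (List String) × PySem.Dict Nat Nat :=
  List.foldl (stepB r) gf (List.range ((gf.1.getD r []).length))

def tilt_north_alt (platform : List (List String)) : List (List String) :=
  (List.foldl rowB (platform, PySem.Dict.empty) (List.range platform.length)).1

-- ===== PRECONDITION & SPEC =====
-- Pre_ excludes exactly the inputs on which A raises IndexError: a rock 'O' that has an
-- all-'.' path straight up to a row too short to contain its column (only possible on
-- ragged platforms); everywhere else A returns normally.
def Raise_cond (g : List (List String)) : Prop :=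
  ∃ r < g.length, ∃ c < (g.getD r []).length, (g.getD r []).getD c "" = "O" ∧
    ∃ s < r, (g.getD s []).length ≤ c ∧
      ∀ t, t < r → s < t → c < (g.getD t []).length ∧ (g.getD t []).getD c "" = "."

def Pre_tilt_north (platform : List (List String)) : Prop := ¬ Raise_cond platform
instance (platform : List (List String)) : Decidable (Pre_tilt_north platform) := by
  unfold Pre_tilt_north Raise_cond; infer_instance

def pvWitness_tilt_north : List (List String) :=
  [["O", ".", "#"], [".", "O", "."], ["O", "O", "."]]

def Spec_tilt_north (platform : List (List String)) (out : List (List String)) : Prop := out = tilt_north_alt platform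
instance (platform : List (List String)) (out : List (List String)) : Decidable (Spec_tilt_north platform out) := by unfold Spec_tilt_north; infer_instance

-- ===== CLAIM (what is proved, stated in full; the proofs are below) =====
def Claim_equal_tilt_north : Prop := ∀ (platform : List (List String)), Dom_tilt_north platform → Pre_tilt_north platform → Spec_tilt_north platform (tilt_north platform)

-- ===== LEMMAS AND PROOFS =====

-- per-column invariant after the sweep has processed all rows < r of column c,
-- with f the column's next-free slot
structure ColSt (orig g : List (List String)) (c f r : Nat) : Prop where
  fle : f ≤ r
  dots : ∀ t, f ≤ t → t < r → c < (g.getD t []).length → (g.getD t []).getD c "" = "."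
  odots : ∀ t, f ≤ t → t < r → c < (orig.getD t []).length →
            ((orig.getD t []).getD c "" = "." ∨ (orig.getD t []).getD c "" = "O")
  blocked : 0 < f → c < (g.getD (f-1) []).length ∧ (g.getD (f-1) []).getD c "" ≠ "."
  settled : ∀ t, t < r → 0 < t → c < (g.getD t []).length → (g.getD t []).getD c "" = "O" →
              c < (g.getD (t-1) []).length ∧ (g.getD (t-1) []).getD c "" ≠ "."
  unch : ∀ t, r ≤ t → cell2 g t c = cell2 orig t c

def GInv (orig g : List (List String)) (free : PySem.Dict Nat Nat) (r : Nat) : Prop :=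
  g.map List.length = orig.map List.length ∧ ∀ c, ColSt orig g c (free.getD c 0) r

def MInv (orig g : List (List String)) (free : PySem.Dict Nat Nat) (r k : Nat) : Prop :=
  g.map List.length = orig.map List.length ∧
    ∀ c, ColSt orig g c (free.getD c 0) (if c < k then r+1 else r)


-- ---- basic 2D-grid observation lemmas ----

theorem getElem?_of_lt (g : List (List String)) (t : Nat) (h : t < g.length) :
    g[t]? = some (g.getD t []) := by
  simp [List.getD_eq_getElem?_getD, List.getElem?_eq_getElem h]

theorem lt_of_getElem?_some {α : Type} (l : List α) (i : Nat) (a : α) (h : l[i]? = some a) :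
    i < l.length := by
  rcases List.getElem?_eq_some_iff.mp h with ⟨h1, _⟩
  exact h1

theorem lt_of_lenRow_pos (g : List (List String)) (t c : Nat)
    (h : c < (g.getD t []).length) : t < g.length := by
  by_contra hc
  have hnone : g[t]? = none := List.getElem?_eq_none_iff.mpr (by omega)
  rw [List.getD_eq_getElem?_getD, hnone] at h
  simp at h

theorem cell2_of_lt (g : List (List String)) (t c : Nat)
    (ht : t < g.length) (hc : c < (g.getD t []).length) :
    cell2 g t c = some ((g.getD t []).getD c "") := by
  unfold cell2
  rw [getElem?_of_lt g t ht]
  show (g.getD t [])[c]? = _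
  rw [List.getElem?_eq_getElem hc, List.getD_eq_getElem _ _ hc]

theorem setCell_getElem? (g : List (List String)) (r c : Nat) (v : String) (t : Nat) :
    (setCell g r c v)[t]? = if t = r then (g[r]?).map (fun row => row.set c v) else g[t]? := by
  unfold setCell
  by_cases ht : t = r
  · subst ht
    rw [if_pos rfl]
    by_cases hr : t < g.length
    · rw [List.getElem?_set_self hr, getElem?_of_lt g t hr]
      rfl
    · have h1 : g[t]? = none := List.getElem?_eq_none_iff.mpr (by omega)
      have h2 : (g.set t ((g.getD t []).set c v))[t]? = none :=
        List.getElem?_eq_none_iff.mpr (by simp; omega)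
      rw [h1, h2]
      rfl
  · rw [if_neg ht]
    exact List.getElem?_set_ne (Ne.symm ht)
  
theorem lenRow_setCell (g : List (List String)) (r c : Nat) (v : String) (t : Nat) :
    ((setCell g r c v).getD t []).length = (g.getD t []).length := by
  rw [List.getD_eq_getElem?_getD, List.getD_eq_getElem?_getD, setCell_getElem?]
  by_cases ht : t = r
  · subst ht; rw [if_pos rfl]; cases g[t]? <;> simp
  · rw [if_neg ht]

theorem mapLength_setCell (g : List (List String)) (r c : Nat) (v : String) :
    (setCell g r c v).map List.length = g.map List.length := by
  apply List.ext_getElem?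
  intro t
  rw [List.getElem?_map, List.getElem?_map, setCell_getElem?]
  by_cases ht : t = r
  · subst ht; rw [if_pos rfl]; cases g[t]? <;> simp
  · rw [if_neg ht]

theorem cell2_setCell_ne (g : List (List String)) (r c : Nat) (v : String) (t c' : Nat)
    (h : t ≠ r ∨ c' ≠ c) : cell2 (setCell g r c v) t c' = cell2 g t c' := by
  unfold cell2
  rw [setCell_getElem?]
  by_cases ht : t = r
  · subst ht
    rw [if_pos rfl]
    have hcne : c' ≠ c := by tauto
    cases hr : g[t]? with
    | none => rfl
    | some row => simp [List.getElem?_set_ne (fun hh => hcne hh.symm)]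
  · rw [if_neg ht]

theorem getDcell_setCell_ne (g : List (List String)) (r c : Nat) (v : String) (t c' : Nat)
    (h : t ≠ r ∨ c' ≠ c) :
    ((setCell g r c v).getD t []).getD c' "" = ((g.getD t []).getD c' "") := by
  rw [List.getD_eq_getElem?_getD, List.getD_eq_getElem?_getD,
      List.getD_eq_getElem?_getD, List.getD_eq_getElem?_getD, setCell_getElem?]
  by_cases ht : t = r
  · subst ht
    rw [if_pos rfl]
    have hcne : c' ≠ c := by tauto
    cases hr : g[t]? with
    | none => rfl
    | some row => simp [List.getElem?_set_ne (fun hh => hcne hh.symm)]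
  · rw [if_neg ht]

theorem getDcell_setCell_self (g : List (List String)) (r c : Nat) (v : String)
    (hr : r < g.length) (hc : c < (g.getD r []).length) :
    ((setCell g r c v).getD r []).getD c "" = v := by
  have h1 : (setCell g r c v)[r]? = some ((g.getD r []).set c v) := by
    rw [setCell_getElem?, if_pos rfl, getElem?_of_lt g r hr]
    rfl
  have h2 : (setCell g r c v).getD r [] = (g.getD r []).set c v := by
    rw [List.getD_eq_getElem?_getD, h1]
    rfl
  rw [h2, List.getD_eq_getElem?_getD, List.getElem?_set_self hc]
  rfl

theorem mapLength_lenRow (g g' : List (List String))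
    (h : g.map List.length = g'.map List.length) (t : Nat) :
    (g.getD t []).length = (g'.getD t []).length := by
  have h2 := congrArg (fun l => l[t]?) h
  simp only [List.getElem?_map] at h2
  rw [List.getD_eq_getElem?_getD, List.getD_eq_getElem?_getD]
  cases h3 : g[t]? with
  | none =>
    rw [h3] at h2
    cases h4 : g'[t]? with
    | none => rfl
    | some row => rw [h4] at h2; simp at h2
  | some row =>
    rw [h3] at h2
    cases h4 : g'[t]? with
    | none => rw [h4] at h2; simp at h2
    | some row' => rw [h4] at h2; simp at h2; simpa using h2

-- ---- scan characterisation ----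

theorem scanA_eq (g : List (List String)) (c : Nat) :
    ∀ (r f : Nat), f ≤ r → (∀ t, f ≤ t → t < r → cell2 g t c = some ".") →
      (f = 0 ∨ ¬ (cell2 g (f-1) c = some ".")) → scanA g c r = f := by
  intro r
  induction r with
  | zero => intro f h1 _ _; interval_cases f; rfl
  | succ n ih =>
    intro f h1 h2 h3
    by_cases hf : f = n + 1
    · subst hf
      have : ¬ (cell2 g n c = some ".") := by
        rcases h3 with h | h
        · omega
        · simpa using h
      simp only [scanA, if_neg this]
    · have hle : f ≤ n := by omega
      have hdot : cell2 g n c = some "." := h2 n hle (by omega)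
      simp only [scanA, if_pos hdot]
      exact ih f hle (fun t ht1 ht2 => h2 t ht1 (by omega)) h3

-- ---- Pre_: a clear path up to a short row yields Raise_cond ----

theorem raise_of_short (orig : List (List String)) (c r : Nat)
    (hr : r < orig.length) (hcr : c < (orig.getD r []).length)
    (hO : (orig.getD r []).getD c "" = "O") (f : Nat)
    (hpat : ∀ t, f ≤ t → t < r → c < (orig.getD t []).length →
      ((orig.getD t []).getD c "" = "." ∨ (orig.getD t []).getD c "" = "O")) :
    ∀ (d s : Nat), r - s ≤ d → f ≤ s → s < r → (orig.getD s []).length ≤ c →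
      Raise_cond orig := by
  intro d
  induction d with
  | zero => intro s h1 _ h3 _; omega
  | succ n ih =>
    intro s h1 h2 h3 hshort
    by_cases hmore : ∃ t, s < t ∧ t < r ∧ (orig.getD t []).length ≤ c
    · obtain ⟨t, ht1, ht2, ht3⟩ := hmore
      exact ih t (by omega) (by omega) ht2 ht3
    · push Not at hmore
      by_cases hexO : ∃ t, s < t ∧ t < r ∧ (orig.getD t []).getD c "" = "O"
      · have t0 := Nat.find hexO
        obtain ⟨h01, h02, h03⟩ := Nat.find_spec hexO
        refine ⟨Nat.find hexO, by omega, c, hmore _ h01 h02, h03, s, h01, hshort, ?_⟩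
        intro t htl hts
        have htr : t < r := by omega
        have hlen : c < (orig.getD t []).length := hmore t hts htr
        refine ⟨hlen, ?_⟩
        have hnotO : ¬ (s < t ∧ t < r ∧ (orig.getD t []).getD c "" = "O") :=
          Nat.find_min hexO htl
        rcases hpat t (by omega) htr hlen with h | h
        · exact h
        · exact absurd ⟨hts, htr, h⟩ hnotO
      · push Not at hexO
        refine ⟨r, hr, c, hcr, hO, s, h3, hshort, ?_⟩
        intro t htl hts
        have hlen : c < (orig.getD t []).length := hmore t hts htl
        rcases hpat t (by omega) htl hlen with h | h
        · exact ⟨hlen, h⟩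
        · exact absurd h (hexO t hts htl)

theorem no_short (orig : List (List String)) (hpre : ¬ Raise_cond orig) (c r : Nat)
    (hr : r < orig.length) (hcr : c < (orig.getD r []).length)
    (hO : (orig.getD r []).getD c "" = "O") (f : Nat)
    (hpat : ∀ t, f ≤ t → t < r → c < (orig.getD t []).length →
      ((orig.getD t []).getD c "" = "." ∨ (orig.getD t []).getD c "" = "O")) :
    ∀ s, f ≤ s → s < r → c < (orig.getD s []).length := by
  intro s h1 h2
  by_contra hc
  push Not at hc
  exact hpre (raise_of_short orig c r hr hcr hO f hpat (r - s) s le_rfl h1 h2 hc)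

-- ---- transporting a column invariant along column-preserving grid changes ----

theorem ColSt_congr (orig g g' : List (List String)) (c f r : Nat)
    (hlen : ∀ t, ((g'.getD t []).length) = (g.getD t []).length)
    (hcell : ∀ t, (g'.getD t []).getD c "" = (g.getD t []).getD c "")
    (hc2 : ∀ t, cell2 g' t c = cell2 g t c)
    (h : ColSt orig g c f r) : ColSt orig g' c f r := by
  constructor
  · exact h.fle
  · intro t h1 h2 h3; rw [hcell]; exact h.dots t h1 h2 (by rw [← hlen]; exact h3)
  · exact h.odots
  · intro h1
    obtain ⟨ha, hb⟩ := h.blocked h1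
    exact ⟨by rw [hlen]; exact ha, by rw [hcell]; exact hb⟩
  · intro t h1 h2 h3 h4
    obtain ⟨ha, hb⟩ := h.settled t h1 h2 (by rw [← hlen]; exact h3) (by rw [← hcell]; exact h4)
    exact ⟨by rw [hlen]; exact ha, by rw [hcell]; exact hb⟩
  · intro t h1; rw [hc2]; exact h.unch t h1

theorem ColSt_advance (orig g : List (List String)) (c f r : Nat)
    (h : ColSt orig g c f r)
    (h1 : (orig.getD r []).length ≤ c) (h2 : (g.getD r []).length ≤ c) :
    ColSt orig g c f (r+1) := by
  constructor
  · have := h.fle; omega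
  · intro t ht1 ht2 ht3
    have htr : t < r := by
      by_contra hcon
      have heq : t = r := by omega
      subst heq; omega
    exact h.dots t ht1 htr ht3
  · intro t ht1 ht2 ht3
    have htr : t < r := by
      by_contra hcon
      have heq : t = r := by omega
      subst heq; omega
    exact h.odots t ht1 htr ht3
  · exact h.blocked
  · intro t ht1 ht2 ht3 ht4
    have htr : t < r := by
      by_contra hcon
      have heq : t = r := by omega
      subst heq; omega
    exact h.settled t htr ht2 ht3 ht4
  · intro t ht1; exact h.unch t (by omega)

theorem main_step (orig : List (List String)) (hpre : ¬ Raise_cond orig)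
    (g : List (List String)) (st : Bool) (free : PySem.Dict Nat Nat) (r k : Nat)
    (hr : r < orig.length) (hk : k < (orig.getD r []).length)
    (hinv : MInv orig g free r k) :
    (stepA r (g, st) k).1 = (stepB r (g, free) k).1 ∧
      MInv orig (stepB r (g, free) k).1 (stepB r (g, free) k).2 r (k+1) := by
  obtain ⟨hsh, hcols⟩ := hinv
  have hcolk : ColSt orig g k (free.getD k 0) r := by
    have h0 := hcols k
    rw [if_neg (Nat.lt_irrefl k)] at h0
    exact h0
  have hglen : g.length = orig.length := by
    have h0 := congrArg List.length hsh
    simpa using h0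
  have hlr : ∀ t, (g.getD t []).length = (orig.getD t []).length := mapLength_lenRow g orig hsh
  have hrg : r < g.length := by omega
  have hkg : k < (g.getD r []).length := by rw [hlr]; exact hk
  have hc2g : cell2 g r k = some ((g.getD r []).getD k "") := cell2_of_lt g r k hrg hkg
  have hc2o : cell2 orig r k = some ((orig.getD r []).getD k "") := cell2_of_lt orig r k hr hk
  have horig : (orig.getD r []).getD k "" = (g.getD r []).getD k "" := by
    have h0 := hcolk.unch r le_rfl
    rw [hc2g, hc2o] at h0
    exact (Option.some.inj h0).symm
  have stage_eq : ∀ (c : Nat), c ≠ k →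
      (if c < k+1 then r+1 else r) = (if c < k then r+1 else r) := by
    intro c hc
    by_cases h0 : c < k
    · rw [if_pos (by omega), if_pos h0]
    · rw [if_neg (by omega), if_neg h0]
  by_cases hOv : (g.getD r []).getD k "" = "O"
  · -- a rock at (r, k)
    have horigO : (orig.getD r []).getD k "" = "O" := by rw [horig, hOv]
    have hnoshort : ∀ s, free.getD k 0 ≤ s → s < r → k < (orig.getD s []).length :=
      no_short orig hpre k r hr hk horigO (free.getD k 0)
        (fun t h1 h2 h3 => hcolk.odots t h1 h2 h3)
    have hnoshortg : ∀ s, free.getD k 0 ≤ s → s < r → k < (g.getD s []).length := by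
      intro s h1 h2; rw [hlr]; exact hnoshort s h1 h2
    have hdots : ∀ t, free.getD k 0 ≤ t → t < r → cell2 g t k = some "." := by
      intro t h1 h2
      have hlt : t < g.length := by omega
      rw [cell2_of_lt g t k hlt (hnoshortg t h1 h2), hcolk.dots t h1 h2 (hnoshortg t h1 h2)]
    have hstop : free.getD k 0 = 0 ∨ ¬ (cell2 g (free.getD k 0 - 1) k = some ".") := by
      by_cases hf0 : free.getD k 0 = 0
      · left; exact hf0
      · right
        obtain ⟨hb1, hb2⟩ := hcolk.blocked (by omega)
        rw [cell2_of_lt g (free.getD k 0 - 1) k (lt_of_lenRow_pos g _ k hb1) hb1]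
        intro hcon
        exact hb2 (Option.some.inj hcon)
    have hscan : scanA g k r = free.getD k 0 := scanA_eq g k r _ hcolk.fle hdots hstop
    by_cases hfr : free.getD k 0 = r
    · -- rock already settled: no move
      have hnn : ¬ (free.getD k 0 ≠ r) := by simp [hfr]
      have hA : stepA r (g, st) k = (g, st) := by
        unfold stepA
        dsimp only
        rw [hc2g]
        simp only [Option.some.injEq]
        rw [if_pos hOv, hscan, if_neg hnn]
      have hB : stepB r (g, free) k = (g, free.insert k (free.getD k 0 + 1)) := by
        unfold stepB
        dsimp only
        rw [hc2g]
        simp only [Option.some.injEq]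
        rw [if_pos hOv, if_neg hnn]
      rw [hA, hB]
      refine ⟨rfl, hsh, ?_⟩
      intro c
      dsimp only
      by_cases hck : c = k
      · subst c
        rw [if_pos (by omega), PySem.Dict.getD_insert_self, hfr]
        constructor
        · omega
        · intro t h1 h2 _; omega
        · intro t h1 h2 _; omega
        · intro _
          refine ⟨by simpa using hkg, ?_⟩
          simp only [Nat.add_sub_cancel]
          rw [hOv]; decide
        · intro t h1 h2 h3 h4
          by_cases htr : t = r
          · subst t
            have h5 := hcolk.blocked (by omega)
            rw [hfr] at h5
            exact h5
          · exact hcolk.settled t (by omega) h2 h3 h4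
        · intro t h1; exact hcolk.unch t (by omega)
      · rw [stage_eq c hck, PySem.Dict.getD_insert_of_ne free _ 0 hck]
        exact hcols c
    · -- the rock moves up to f = free.getD k 0 < r
      have hflt : free.getD k 0 < r := Nat.lt_of_le_of_ne hcolk.fle hfr
      have hfg : free.getD k 0 < g.length := by omega
      have hkf : k < (g.getD (free.getD k 0) []).length := hnoshortg _ le_rfl hflt
      have hA : stepA r (g, st) k =
          (setCell (setCell g r k ".") (free.getD k 0) k "O", false) := by
        unfold stepA
        dsimp only
        rw [hc2g]
        simp only [Option.some.injEq]
        rw [if_pos hOv, hscan, if_pos hfr]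
      have hB : stepB r (g, free) k =
          (setCell (setCell g r k ".") (free.getD k 0) k "O",
            free.insert k (free.getD k 0 + 1)) := by
        unfold stepB
        dsimp only
        rw [hc2g]
        simp only [Option.some.injEq]
        rw [if_pos hOv, if_pos hfr]
      rw [hA, hB]
      have hg'lenrow : ∀ t,
          ((setCell (setCell g r k ".") (free.getD k 0) k "O").getD t []).length =
            (g.getD t []).length := by
        intro t; rw [lenRow_setCell, lenRow_setCell]
      have hsh' : (setCell (setCell g r k ".") (free.getD k 0) k "O").map List.length =
          orig.map List.length := by
        rw [mapLength_setCell, mapLength_setCell]; exact hsh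
      have hcellr : ((setCell (setCell g r k ".") (free.getD k 0) k "O").getD r []).getD k ""
          = "." := by
        rw [getDcell_setCell_ne _ _ _ _ _ _ (Or.inl (by omega : r ≠ free.getD k 0))]
        exact getDcell_setCell_self g r k "." hrg hkg
      have hcellf : ((setCell (setCell g r k ".") (free.getD k 0) k "O").getD
          (free.getD k 0) []).getD k "" = "O" := by
        apply getDcell_setCell_self
        · have h0 := congrArg List.length (mapLength_setCell g r k ".")
          simp only [List.length_map] at h0
          omega
        · rw [lenRow_setCell]; exact hkf
      have hcell_other : ∀ t, t ≠ r → t ≠ free.getD k 0 →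
          ((setCell (setCell g r k ".") (free.getD k 0) k "O").getD t []).getD k ""
            = (g.getD t []).getD k "" := by
        intro t h1 h2
        rw [getDcell_setCell_ne _ _ _ _ _ _ (Or.inl h2),
            getDcell_setCell_ne _ _ _ _ _ _ (Or.inl h1)]
      have hc2_other : ∀ t, t ≠ r → t ≠ free.getD k 0 →
          cell2 (setCell (setCell g r k ".") (free.getD k 0) k "O") t k = cell2 g t k := by
        intro t h1 h2
        rw [cell2_setCell_ne _ _ _ _ _ _ (Or.inl h2), cell2_setCell_ne _ _ _ _ _ _ (Or.inl h1)]
      refine ⟨rfl, hsh', ?_⟩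
      intro c
      dsimp only
      by_cases hck : c = k
      · subst c
        rw [if_pos (by omega), PySem.Dict.getD_insert_self]
        constructor
        · omega
        · -- dots
          intro t h1 h2 h3
          rw [hg'lenrow] at h3
          by_cases htr : t = r
          · subst t; exact hcellr
          · have htf : t ≠ free.getD k 0 := by omega
            rw [hcell_other t htr htf]
            exact hcolk.dots t (by omega) (by omega) h3
        · -- odots
          intro t h1 h2 h3
          by_cases htr : t = r
          · subst t; right; exact horigO
          · exact hcolk.odots t (by omega) (by omega) h3
        · -- blocked
          intro _
          simp only [Nat.add_sub_cancel]
          refine ⟨?_, ?_⟩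
          · rw [hg'lenrow]; exact hkf
          · rw [hcellf]; decide
        · -- settled
          intro t h1 h2 h3 h4
          rw [hg'lenrow] at h3
          by_cases htr : t = r
          · subst t; rw [hcellr] at h4; exact absurd h4 (by decide)
          · by_cases htf : t = free.getD k 0
            · obtain ⟨hb1, hb2⟩ := hcolk.blocked (by omega)
              have hd1 : t - 1 ≠ r := by omega
              have hd2 : t - 1 ≠ free.getD k 0 := by omega
              rw [hg'lenrow, hcell_other (t-1) hd1 hd2, htf]
              exact ⟨hb1, hb2⟩
            · rw [hcell_other t htr htf] at h4
              by_cases hlt : t < free.getD k 0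
              · obtain ⟨hb1, hb2⟩ := hcolk.settled t (by omega) h2 h3 h4
                have hd1 : t - 1 ≠ r := by omega
                have hd2 : t - 1 ≠ free.getD k 0 := by omega
                rw [hg'lenrow, hcell_other (t-1) hd1 hd2]
                exact ⟨hb1, hb2⟩
              · have hge : free.getD k 0 ≤ t := by omega
                have hdot := hcolk.dots t hge (by omega) h3
                rw [hdot] at h4
                exact absurd h4 (by decide)
        · -- unch
          intro t h1
          rw [hc2_other t (by omega) (by omega)]
          exact hcolk.unch t (by omega)
      · rw [stage_eq c hck, PySem.Dict.getD_insert_of_ne free _ 0 hck]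
        refine ColSt_congr orig g _ c _ _ ?_ ?_ ?_ (hcols c)
        · intro t; rw [lenRow_setCell, lenRow_setCell]
        · intro t
          rw [getDcell_setCell_ne _ _ _ _ _ _ (Or.inr hck),
              getDcell_setCell_ne _ _ _ _ _ _ (Or.inr hck)]
        · intro t
          rw [cell2_setCell_ne _ _ _ _ _ _ (Or.inr hck),
              cell2_setCell_ne _ _ _ _ _ _ (Or.inr hck)]
  · by_cases hDot : (g.getD r []).getD k "" = "."
    · -- an empty cell
      have hA : stepA r (g, st) k = (g, st) := by
        unfold stepA
        dsimp only
        rw [hc2g]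
        simp only [Option.some.injEq]
        rw [if_neg hOv]
      have hB : stepB r (g, free) k = (g, free) := by
        unfold stepB
        dsimp only
        rw [hc2g]
        simp only [Option.some.injEq]
        rw [if_neg hOv, if_pos hDot]
      rw [hA, hB]
      refine ⟨rfl, hsh, ?_⟩
      intro c
      dsimp only
      by_cases hck : c = k
      · subst c
        rw [if_pos (by omega)]
        constructor
        · have h0 := hcolk.fle; omega
        · intro t h1 h2 h3
          by_cases htr : t = r
          · subst t; exact hDot
          · exact hcolk.dots t h1 (by omega) h3
        · intro t h1 h2 h3
          by_cases htr : t = r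
          · subst t; left; rw [horig]; exact hDot
          · exact hcolk.odots t h1 (by omega) h3
        · exact hcolk.blocked
        · intro t h1 h2 h3 h4
          by_cases htr : t = r
          · subst t; rw [hDot] at h4; exact absurd h4 (by decide)
          · exact hcolk.settled t (by omega) h2 h3 h4
        · intro t h1; exact hcolk.unch t (by omega)
      · rw [stage_eq c hck]
        exact hcols c
    · -- a blocker cell (anything other than 'O' and '.')
      have hA : stepA r (g, st) k = (g, st) := by
        unfold stepA
        dsimp only
        rw [hc2g]
        simp only [Option.some.injEq]
        rw [if_neg hOv]
      have hB : stepB r (g, free) k = (g, free.insert k (r + 1)) := by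
        unfold stepB
        dsimp only
        rw [hc2g]
        simp only [Option.some.injEq]
        rw [if_neg hOv, if_neg hDot]
      rw [hA, hB]
      refine ⟨rfl, hsh, ?_⟩
      intro c
      dsimp only
      by_cases hck : c = k
      · subst c
        rw [if_pos (by omega), PySem.Dict.getD_insert_self]
        constructor
        · omega
        · intro t h1 h2 _; omega
        · intro t h1 h2 _; omega
        · intro _
          simp only [Nat.add_sub_cancel]
          exact ⟨hkg, hDot⟩
        · intro t h1 h2 h3 h4
          by_cases htr : t = r
          · subst t; exact absurd h4 hOv
          · exact hcolk.settled t (by omega) h2 h3 h4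
        · intro t h1; exact hcolk.unch t (by omega)
      · rw [stage_eq c hck, PySem.Dict.getD_insert_of_ne free _ 0 hck]
        exact hcols c

theorem row_fold (orig : List (List String)) (hpre : ¬ Raise_cond orig) (r : Nat)
    (hr : r < orig.length) :
    ∀ (m k : Nat) (g : List (List String)) (st : Bool) (free : PySem.Dict Nat Nat),
      k + m ≤ (orig.getD r []).length → MInv orig g free r k →
      (List.foldl (stepA r) (g, st) (List.range' k m)).1 =
        (List.foldl (stepB r) (g, free) (List.range' k m)).1 ∧
      MInv orig (List.foldl (stepB r) (g, free) (List.range' k m)).1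
        (List.foldl (stepB r) (g, free) (List.range' k m)).2 r (k+m) := by
  intro m
  induction m with
  | zero =>
    intro k g st free hkm hinv
    simp only [List.range'_zero, List.foldl_nil]
    exact ⟨trivial, by simpa using hinv⟩
  | succ n ih =>
    intro k g st free hkm hinv
    rw [List.range'_succ]
    simp only [List.foldl_cons]
    obtain ⟨heq, hinv'⟩ := main_step orig hpre g st free r k hr (by omega) hinv
    have hsA : stepA r (g, st) k = ((stepB r (g, free) k).1, (stepA r (g, st) k).2) :=
      Prod.ext_iff.mpr ⟨heq, rfl⟩
    rw [hsA]
    have hres := ih (k+1) (stepB r (g, free) k).1 (stepA r (g, st) k).2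
      (stepB r (g, free) k).2 (by omega) hinv'
    have hkn : k + (n+1) = (k+1) + n := by omega
    rw [hkn]
    exact hres

theorem pass_fold (orig : List (List String)) (hpre : ¬ Raise_cond orig) :
    ∀ (m r : Nat) (g : List (List String)) (st : Bool) (free : PySem.Dict Nat Nat),
      r + m ≤ orig.length → GInv orig g free r →
      (List.foldl rowA (g, st) (List.range' r m)).1 =
        (List.foldl rowB (g, free) (List.range' r m)).1 ∧
      GInv orig (List.foldl rowB (g, free) (List.range' r m)).1
        (List.foldl rowB (g, free) (List.range' r m)).2 (r+m) := by
  intro m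
  induction m with
  | zero =>
    intro r g st free hrm hinv
    simp only [List.range'_zero, List.foldl_nil]
    exact ⟨trivial, by simpa using hinv⟩
  | succ n ih =>
    intro r g st free hrm hinv
    rw [List.range'_succ]
    simp only [List.foldl_cons]
    have hr : r < orig.length := by omega
    have hminv0 : MInv orig g free r 0 :=
      ⟨hinv.1, fun c => by rw [if_neg (Nat.not_lt_zero c)]; exact hinv.2 c⟩
    have hL : (g.getD r []).length = (orig.getD r []).length := mapLength_lenRow g orig hinv.1 r
    obtain ⟨heq, hminvL⟩ := row_fold orig hpre r hr ((orig.getD r []).length) 0 g st free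
      (by omega) hminv0
    simp only [Nat.zero_add] at hminvL
    have hrowA : rowA (g, st) r =
        List.foldl (stepA r) (g, st) (List.range' 0 ((orig.getD r []).length)) := by
      unfold rowA
      dsimp only
      rw [hL, List.range_eq_range']
    have hrowB : rowB (g, free) r =
        List.foldl (stepB r) (g, free) (List.range' 0 ((orig.getD r []).length)) := by
      unfold rowB
      dsimp only
      rw [hL, List.range_eq_range']
    have hginv' : GInv orig
        (List.foldl (stepB r) (g, free) (List.range' 0 ((orig.getD r []).length))).1
        (List.foldl (stepB r) (g, free) (List.range' 0 ((orig.getD r []).length))).2 (r+1) := by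
      obtain ⟨hsh', hcols'⟩ := hminvL
      refine ⟨hsh', ?_⟩
      intro c
      have hc := hcols' c
      by_cases hcL : c < (orig.getD r []).length
      · rw [if_pos hcL] at hc; exact hc
      · rw [if_neg hcL] at hc
        apply ColSt_advance orig _ c _ r hc
        · omega
        · rw [mapLength_lenRow _ orig hsh' r]; omega
    have hsA : rowA (g, st) r =
        ((List.foldl (stepB r) (g, free) (List.range' 0 ((orig.getD r []).length))).1,
          (rowA (g, st) r).2) := by
      refine Prod.ext_iff.mpr ⟨?_, rfl⟩
      rw [hrowA]
      exact heq
    rw [hsA, hrowB]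
    have hres := ih (r+1)
      (List.foldl (stepB r) (g, free) (List.range' 0 ((orig.getD r []).length))).1
      (rowA (g, st) r).2
      (List.foldl (stepB r) (g, free) (List.range' 0 ((orig.getD r []).length))).2
      (by omega) hginv'
    have hrn : r + (n+1) = (r+1) + n := by omega
    rw [hrn]
    exact hres

theorem foldl_fixed {α β : Type} (F : β → α → β) (s : β) (h : ∀ a, F s a = s) :
    ∀ l : List α, List.foldl F s l = s := by
  intro l
  induction l with
  | nil => rfl
  | cons a t ih => simp only [List.foldl_cons, h a]; exact ih

theorem settled_fix (g : List (List String))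
    (hs : ∀ t c, t < g.length → 0 < t → c < (g.getD t []).length → (g.getD t []).getD c "" = "O" →
          c < (g.getD (t-1) []).length ∧ (g.getD (t-1) []).getD c "" ≠ ".") :
    tilt_north g = g := by
  have hstep : ∀ (st : Bool) (r c : Nat), stepA r (g, st) c = (g, st) := by
    intro st r c
    unfold stepA
    dsimp only
    by_cases hO : cell2 g r c = some "O"
    · rw [if_pos hO]
      obtain ⟨row, hrow, hcell⟩ := cell2_some g r c "O" hO
      have hrg : r < g.length := lt_of_getElem?_some g r row hrow
      have hrowD : g.getD r [] = row := by rw [List.getD_eq_getElem?_getD, hrow]; rfl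
      have hclen : c < (g.getD r []).length := by
        rw [hrowD]; exact lt_of_getElem?_some row c "O" hcell
      have hcellD : (g.getD r []).getD c "" = "O" := by
        rw [hrowD, List.getD_eq_getElem?_getD, hcell]; rfl
      have hscan : scanA g c r = r := by
        apply scanA_eq g c r r le_rfl
        · intro t h1 h2; omega
        · by_cases hr0 : r = 0
          · left; exact hr0
          · right
            obtain ⟨hb1, hb2⟩ := hs r c hrg (by omega) hclen hcellD
            rw [cell2_of_lt g (r-1) c (by omega) hb1]
            intro hcon
            exact hb2 (Option.some.inj hcon)
      rw [hscan]
      simp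
    · rw [if_neg hO]
  have hpass : passA g = (g, true) := by
    unfold passA
    apply foldl_fixed
    intro r
    unfold rowA
    dsimp only
    apply foldl_fixed
    intro c
    exact hstep true r c
  rw [tilt_north]
  simp [hpass]

theorem tilt_north_spec : Claim_equal_tilt_north := by
  intro platform hdom hpre
  unfold Spec_tilt_north
  have hpre' : ¬ Raise_cond platform := hpre
  have hinit : GInv platform platform PySem.Dict.empty 0 := by
    refine ⟨rfl, ?_⟩
    intro c
    have hz : (PySem.Dict.empty : PySem.Dict Nat Nat).getD c 0 = 0 := rfl
    rw [hz]
    constructor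
    · omega
    · intro t _ h2 _; exact absurd h2 (Nat.not_lt_zero t)
    · intro t _ h2 _; exact absurd h2 (Nat.not_lt_zero t)
    · intro h; exact absurd h (lt_irrefl 0)
    · intro t h1 _ _ _; exact absurd h1 (Nat.not_lt_zero t)
    · intro t _; rfl
  obtain ⟨heq, hfin⟩ := pass_fold platform hpre' platform.length 0 platform true
    PySem.Dict.empty (by omega) hinit
  simp only [Nat.zero_add] at hfin
  have hAeq : passA platform =
      List.foldl rowA (platform, true) (List.range' 0 platform.length) := by
    unfold passA; rw [List.range_eq_range']
  have hBeq : tilt_north_alt platform =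
      (List.foldl rowB (platform, PySem.Dict.empty) (List.range' 0 platform.length)).1 := by
    unfold tilt_north_alt; rw [List.range_eq_range']
  rw [tilt_north]
  show (if (passA platform).2 then (passA platform).1
        else tilt_north (passA platform).1) = tilt_north_alt platform
  rw [hAeq, hBeq]
  by_cases hst : (List.foldl rowA (platform, true) (List.range' 0 platform.length)).2
  · rw [if_pos hst]
    exact heq
  · rw [if_neg hst, heq]
    have hshape := hfin.1
    have hlenB :
        (List.foldl rowB (platform, PySem.Dict.empty) (List.range' 0 platform.length)).1.length
          = platform.length := by
      have h0 := congrArg List.length hshape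
      simpa using h0
    apply settled_fix
    intro t c h1 h2 h3 h4
    exact (hfin.2 c).settled t (by omega) h2 h3 h4
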